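-- pv_equiv track=rewrite | github.com/SilentDemonSD/ScamIntelli | src/agent_controller/agent_state.py | _detect_scam_category
-- ===== SOURCE A (Python) =====
-- def _detect_scam_category(keywords: list) -> str:
--     """Detect the type of scam based on keywords."""
--     keywords_lower = [kw.lower() for kw in keywords]
--
--     if any(kw in keywords_lower for kw in ['lottery', 'prize', 'won', 'winner', 'jackpot']):
--         return "Lottery/Prize Scam"
--     elif any(kw in keywords_lower for kw in ['kyc', 'verify', 'blocked', 'suspended', 'account will be blocked']):
--         return "KYC/Phishing Scam"
--     elif any(kw in keywords_lower for kw in ['invest', 'returns', 'profit', 'trading', 'crypto']):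
--         return "Investment Fraud"
--     elif any(kw in keywords_lower for kw in ['job', 'work from home', 'part time', 'salary']):
--         return "Job Scam"
--     elif any(kw in keywords_lower for kw in ['police', 'arrest', 'legal', 'customs', 'parcel']):
--         return "Impersonation/Authority Scam"
--     elif any(kw in keywords_lower for kw in ['otp', 'pin', 'password', 'cvv']):
--         return "Credential Theft Attempt"
--     elif any(kw in keywords_lower for kw in ['transfer', 'send money', 'pay', 'advance']):
--         return "Payment Fraud"
--     return "Suspected Scam"
-- ===== SOURCE B (Python) =====
-- _CATEGORIES = [
--     (['lottery', 'prize', 'won', 'winner', 'jackpot'], "Lottery/Prize Scam"),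
--     (['kyc', 'verify', 'blocked', 'suspended', 'account will be blocked'], "KYC/Phishing Scam"),
--     (['invest', 'returns', 'profit', 'trading', 'crypto'], "Investment Fraud"),
--     (['job', 'work from home', 'part time', 'salary'], "Job Scam"),
--     (['police', 'arrest', 'legal', 'customs', 'parcel'], "Impersonation/Authority Scam"),
--     (['otp', 'pin', 'password', 'cvv'], "Credential Theft Attempt"),
--     (['transfer', 'send money', 'pay', 'advance'], "Payment Fraud"),
-- ]
-- _PRIORITY = {kw: i for i, (kws, _) in enumerate(_CATEGORIES) for kw in kws}
-- _LABELS = [label for _, label in _CATEGORIES]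
--
--
-- def _detect_scam_category(keywords: list) -> str:
--     """Detect the type of scam based on keywords."""
--     best = None
--     for kw in [k.lower() for k in keywords]:
--         p = _PRIORITY.get(kw)
--         if p is not None and (best is None or p < best):
--             best = p
--     return "Suspected Scam" if best is None else _LABELS[best]
-- ===== Notes on version B (the rewrite author's own statement) =====
-- stated objective: faster
-- what changed: Replaced A's ordered cascade of per-category any()-membership scans over the lowered keyword list with a prebuilt keyword-to-priority dict plus a single minimum-tracking pass over the input, returning the label at the minimum priority (or 'Suspected Scam' if none matched).
import Mathlib
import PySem

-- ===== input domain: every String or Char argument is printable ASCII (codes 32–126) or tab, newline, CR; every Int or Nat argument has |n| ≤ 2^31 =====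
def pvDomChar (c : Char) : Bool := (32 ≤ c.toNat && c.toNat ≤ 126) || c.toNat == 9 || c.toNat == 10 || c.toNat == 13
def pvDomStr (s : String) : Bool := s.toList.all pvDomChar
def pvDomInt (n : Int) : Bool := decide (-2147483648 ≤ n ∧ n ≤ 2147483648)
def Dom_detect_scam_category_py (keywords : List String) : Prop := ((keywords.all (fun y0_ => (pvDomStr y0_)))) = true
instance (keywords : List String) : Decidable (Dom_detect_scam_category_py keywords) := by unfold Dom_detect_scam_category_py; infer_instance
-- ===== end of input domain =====

-- B replaces A's per-category any()-membership cascade by a prebuilt keyword→priority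
-- index and a single minimum-tracking pass over the input (objective: alternative).

-- ===== PORT A =====
def detect_scam_category_py (keywords : List String) : String :=
  let kl := keywords.map PySem.Str.lower
  if (["lottery", "prize", "won", "winner", "jackpot"].any (fun kw => kl.contains kw)) then
    "Lottery/Prize Scam"
  else if (["kyc", "verify", "blocked", "suspended", "account will be blocked"].any (fun kw => kl.contains kw)) then
    "KYC/Phishing Scam"
  else if (["invest", "returns", "profit", "trading", "crypto"].any (fun kw => kl.contains kw)) then
    "Investment Fraud"
  else if (["job", "work from home", "part time", "salary"].any (fun kw => kl.contains kw)) then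
    "Job Scam"
  else if (["police", "arrest", "legal", "customs", "parcel"].any (fun kw => kl.contains kw)) then
    "Impersonation/Authority Scam"
  else if (["otp", "pin", "password", "cvv"].any (fun kw => kl.contains kw)) then
    "Credential Theft Attempt"
  else if (["transfer", "send money", "pay", "advance"].any (fun kw => kl.contains kw)) then
    "Payment Fraud"
  else "Suspected Scam"

-- ===== PORT B =====
def pvCats : List (List String × String) :=
  [(["lottery", "prize", "won", "winner", "jackpot"], "Lottery/Prize Scam"),
   (["kyc", "verify", "blocked", "suspended", "account will be blocked"], "KYC/Phishing Scam"),
   (["invest", "returns", "profit", "trading", "crypto"], "Investment Fraud"),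
   (["job", "work from home", "part time", "salary"], "Job Scam"),
   (["police", "arrest", "legal", "customs", "parcel"], "Impersonation/Authority Scam"),
   (["otp", "pin", "password", "cvv"], "Credential Theft Attempt"),
   (["transfer", "send money", "pay", "advance"], "Payment Fraud")]

def pvPriority : PySem.Dict String Int :=
  PySem.Dict.ofList
    ((PySem.List.enumerate pvCats).flatMap (fun p => p.2.1.map (fun kw => (kw, p.1))))

def pvLabels : List String := pvCats.map (fun p => p.2)

def pvStep (best : Option Int) (kw : String) : Option Int :=
  match pvPriority.get? kw with
  | none => best
  | some p =>
    match best with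
    | none => some p
    | some b => if p < b then some p else some b

def detect_scam_category_py_alt (keywords : List String) : String :=
  let best := (keywords.map PySem.Str.lower).foldl pvStep none
  match best with
  | none => "Suspected Scam"
  | some b => (PySem.List.pyGet? pvLabels b).getD ""

-- ===== PRECONDITION & SPEC =====
def Spec_detect_scam_category_py (keywords : List String) (out : String) : Prop := out = detect_scam_category_py_alt keywords
instance (keywords : List String) (out : String) : Decidable (Spec_detect_scam_category_py keywords out) := by unfold Spec_detect_scam_category_py; infer_instance

-- ===== CLAIM (what is proved, stated in full; the proofs are below) =====
def Claim_equal_detect_scam_category_py : Prop := ∀ (keywords : List String), Dom_detect_scam_category_py keywords → Spec_detect_scam_category_py keywords (detect_scam_category_py keywords)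

-- ===== LEMMAS AND PROOFS =====

-- combine two partial minima
def pvOmin : Option Int → Option Int → Option Int
  | none, y => y
  | some a, none => some a
  | some a, some b => some (min a b)

theorem pvStep_eq (acc : Option Int) (k : String) :
    pvStep acc k = pvOmin acc (pvStep none k) := by
  cases acc with
  | none => cases h : pvPriority.get? k <;> simp [pvStep, pvOmin, h]
  | some a =>
    cases h : pvPriority.get? k with
    | none => simp [pvStep, pvOmin, h]
    | some p =>
      simp only [pvStep, h, pvOmin]
      rcases lt_trichotomy p a with hlt | heq | hgt
      · simp [hlt, min_eq_right hlt.le]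
      · simp [heq]
      · simp [not_lt.mpr hgt.le, min_eq_left hgt.le]

theorem pvOmin_assoc (x y z : Option Int) :
    pvOmin (pvOmin x y) z = pvOmin x (pvOmin y z) := by
  cases x <;> cases y <;> cases z <;> simp [pvOmin, min_assoc]

theorem pvFoldl_omin (kl : List String) (acc : Option Int) :
    kl.foldl pvStep acc = pvOmin acc (kl.foldl pvStep none) := by
  induction kl generalizing acc with
  | nil => cases acc <;> simp [pvOmin]
  | cons k kl ih =>
    simp only [List.foldl_cons]
    rw [ih (pvStep acc k), ih (pvStep none k), pvStep_eq acc k, pvOmin_assoc]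

theorem pvF_none_iff (kl : List String) :
    kl.foldl pvStep none = none ↔ ∀ kw ∈ kl, pvPriority.get? kw = none := by
  induction kl with
  | nil => simp
  | cons k kl ih =>
    rw [List.foldl_cons, pvFoldl_omin]
    cases h : pvPriority.get? k with
    | none =>
      have hs : pvStep none k = none := by simp [pvStep, h]
      rw [hs]
      constructor
      · intro hn kw hm
        rcases List.mem_cons.mp hm with rfl | hm
        · exact h
        · exact (ih.mp (by simpa [pvOmin] using hn)) kw hm
      · intro hall
        simpa [pvOmin] using ih.mpr (fun kw hm => hall kw (List.mem_cons_of_mem _ hm))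
    | some p =>
      have hs : pvStep none k = some p := by simp [pvStep, h]
      rw [hs]
      constructor
      · intro hn; cases hrest : kl.foldl pvStep none <;> simp [pvOmin, hrest] at hn
      · intro hall; exact absurd h (by simp [hall k (List.mem_cons_self)])

theorem pvF_some (kl : List String) (b : Int) (h : kl.foldl pvStep none = some b) :
    (∃ kw ∈ kl, pvPriority.get? kw = some b) ∧
    (∀ kw ∈ kl, ∀ p, pvPriority.get? kw = some p → b ≤ p) := by
  induction kl generalizing b with
  | nil => simp at h
  | cons k kl ih =>
    rw [List.foldl_cons, pvFoldl_omin] at h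
    cases hk : pvPriority.get? k with
    | none =>
      have hs : pvStep none k = none := by simp [pvStep, hk]
      rw [hs] at h
      have h' : kl.foldl pvStep none = some b := by
        cases hrest : kl.foldl pvStep none with
        | none => simp [pvOmin, hrest] at h
        | some c => simp [pvOmin, hrest] at h; simp [h]
      obtain ⟨⟨kw, hm, hg⟩, hmin⟩ := ih b h'
      refine ⟨⟨kw, List.mem_cons_of_mem _ hm, hg⟩, ?_⟩
      intro kw' hm' p hp
      rcases List.mem_cons.mp hm' with rfl | hm'
      · exact absurd hp (by simp [hk])
      · exact hmin kw' hm' p hp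
    | some q =>
      have hs : pvStep none k = some q := by simp [pvStep, hk]
      rw [hs] at h
      cases hrest : kl.foldl pvStep none with
      | none =>
        rw [hrest] at h
        simp only [pvOmin] at h
        obtain rfl : q = b := by simpa using h
        refine ⟨⟨k, List.mem_cons_self, hk⟩, ?_⟩
        intro kw' hm' p hp
        rcases List.mem_cons.mp hm' with rfl | hm'
        · rw [hk] at hp; injection hp with e; omega
        · exact absurd hp (by simp [(pvF_none_iff kl).mp hrest kw' hm'])
      | some c =>
        rw [hrest] at h
        simp only [pvOmin, Option.some.injEq] at h
        obtain ⟨⟨kw, hm, hg⟩, hmin⟩ := ih c hrest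
        subst h
        constructor
        · rcases le_total q c with hqc | hcq
          · exact ⟨k, List.mem_cons_self, by rw [hk, min_eq_left hqc]⟩
          · exact ⟨kw, List.mem_cons_of_mem _ hm, by rw [hg, min_eq_right hcq]⟩
        · intro kw' hm' p hp
          rcases List.mem_cons.mp hm' with rfl | hm'
          · rw [hk] at hp; cases hp; exact min_le_left _ _
          · exact le_trans (min_le_right _ _) (hmin kw' hm' p hp)


def pvCat (i : Nat) : List String := ((pvCats.getD i ([], "")).1)
def pvHit (kl : List String) (i : Nat) : Bool := (pvCat i).any (fun kw => kl.contains kw)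

theorem pvA_eq (keywords : List String) :
    detect_scam_category_py keywords =
      (let kl := keywords.map PySem.Str.lower
       if pvHit kl 0 then "Lottery/Prize Scam"
       else if pvHit kl 1 then "KYC/Phishing Scam"
       else if pvHit kl 2 then "Investment Fraud"
       else if pvHit kl 3 then "Job Scam"
       else if pvHit kl 4 then "Impersonation/Authority Scam"
       else if pvHit kl 5 then "Credential Theft Attempt"
       else if pvHit kl 6 then "Payment Fraud"
       else "Suspected Scam") := rfl

theorem pvHit_iff (kl cat : List String) (i : Int)
    (h1 : ∀ kw ∈ cat, pvPriority.get? kw = some i)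
    (h2 : ∀ p ∈ pvPriority.items, p.2 = i → p.1 ∈ cat) :
    (cat.any (fun kw => kl.contains kw) = true) ↔ ∃ kw ∈ kl, pvPriority.get? kw = some i := by
  constructor
  · intro ha
    obtain ⟨kw, hmc, hmk⟩ := List.any_eq_true.mp ha
    exact ⟨kw, by simpa using hmk, h1 kw hmc⟩
  · rintro ⟨kw, hmk, hg⟩
    have hmem := PySem.Dict.mem_items_of_get?_eq_some pvPriority hg
    exact List.any_eq_true.mpr ⟨kw, h2 _ hmem rfl, by simpa using hmk⟩

theorem pvHit_iff' (kl : List String) (i : Nat) (hi : i < 7) :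
    pvHit kl i = true ↔ ∃ kw ∈ kl, pvPriority.get? kw = some (i : Int) := by
  interval_cases i <;> exact pvHit_iff kl _ _ (by decide) (by decide)

theorem pv_main (keywords : List String) :
    detect_scam_category_py keywords = detect_scam_category_py_alt keywords := by
  rw [pvA_eq]
  simp only [detect_scam_category_py_alt]
  cases h : (keywords.map PySem.Str.lower).foldl pvStep none with
  | none =>
    have hall := (pvF_none_iff _).mp h
    have hf : ∀ i : Nat, i < 7 → pvHit (keywords.map PySem.Str.lower) i = false := by
      intro i hi
      rw [Bool.eq_false_iff]
      intro ht
      obtain ⟨kw, hmk, hg⟩ := (pvHit_iff' _ i hi).mp ht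
      rw [hall kw hmk] at hg
      cases hg
    simp only [hf 0 (by norm_num), hf 1 (by norm_num), hf 2 (by norm_num), hf 3 (by norm_num),
      hf 4 (by norm_num), hf 5 (by norm_num), hf 6 (by norm_num)]
    decide
  | some b =>
    obtain ⟨⟨kw0, hm0, hg0⟩, hmin⟩ := pvF_some _ b h
    have hmem := PySem.Dict.mem_items_of_get?_eq_some pvPriority hg0
    have hb : b = 0 ∨ b = 1 ∨ b = 2 ∨ b = 3 ∨ b = 4 ∨ b = 5 ∨ b = 6 := by
      have hv : ∀ p ∈ pvPriority.items, p.2 = 0 ∨ p.2 = 1 ∨ p.2 = 2 ∨ p.2 = 3 ∨ p.2 = 4 ∨ p.2 = 5 ∨ p.2 = 6 := by decide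
      exact hv _ hmem
    have hlow : ∀ i : Nat, i < 7 → (i : Int) < b → pvHit (keywords.map PySem.Str.lower) i = false := by
      intro i hi hib
      rw [Bool.eq_false_iff]
      intro ht
      obtain ⟨kw, hmk, hg⟩ := (pvHit_iff' _ i hi).mp ht
      have := hmin kw hmk _ hg
      omega
    have hhit : ∀ i : Nat, i < 7 → b = (i : Int) → pvHit (keywords.map PySem.Str.lower) i = true := by
      intro i hi hbi
      exact (pvHit_iff' _ i hi).mpr ⟨kw0, hm0, hbi ▸ hg0⟩
    rcases hb with rfl | rfl | rfl | rfl | rfl | rfl | rfl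
    · simp only [hhit 0 (by norm_num) rfl, if_true]; decide
    · simp only [hlow 0 (by norm_num) (by norm_num), hhit 1 (by norm_num) rfl, if_true]; decide
    · simp only [hlow 0 (by norm_num) (by norm_num), hlow 1 (by norm_num) (by norm_num),
        hhit 2 (by norm_num) rfl, if_true]; decide
    · simp only [hlow 0 (by norm_num) (by norm_num), hlow 1 (by norm_num) (by norm_num),
        hlow 2 (by norm_num) (by norm_num), hhit 3 (by norm_num) rfl, if_true]; decide
    · simp only [hlow 0 (by norm_num) (by norm_num), hlow 1 (by norm_num) (by norm_num),
        hlow 2 (by norm_num) (by norm_num), hlow 3 (by norm_num) (by norm_num),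
        hhit 4 (by norm_num) rfl, if_true]; decide
    · simp only [hlow 0 (by norm_num) (by norm_num), hlow 1 (by norm_num) (by norm_num),
        hlow 2 (by norm_num) (by norm_num), hlow 3 (by norm_num) (by norm_num),
        hlow 4 (by norm_num) (by norm_num), hhit 5 (by norm_num) rfl, if_true]; decide
    · simp only [hlow 0 (by norm_num) (by norm_num), hlow 1 (by norm_num) (by norm_num),
        hlow 2 (by norm_num) (by norm_num), hlow 3 (by norm_num) (by norm_num),
        hlow 4 (by norm_num) (by norm_num), hlow 5 (by norm_num) (by norm_num),
        hhit 6 (by norm_num) rfl, if_true]; decide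

-- ===== VERDICT (by name: the statement is the Claim_ definition above) =====
theorem detect_scam_category_py_spec : Claim_equal_detect_scam_category_py := by
  intro keywords _
  unfold Spec_detect_scam_category_py
  exact pv_main keywords
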